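-- pv_equiv track=rewrite | github.com/pypi-data/pypi-mirror-350 | packages/napari-czi-reader/napari_czi_reader-1.0.0.tar.gz/napari_czi_reader-1.0.0/src/napari_czi_reader/czi_reader_CFIM.py | truncate_filename
-- ===== SOURCE A (Python) =====
-- def truncate_filename(filename, max_chars, split_before_max=True):
--     """
--         Splits a filename into words and truncates it to max_chars.
--         If split_before_max is False, it will include the first word that exceeds max_chars.
--     """
--     words = filename.split()
--     result = []
--     current_length = 0
--
--     for word in words:
--         extra = 1 if result else 0
--
--         if current_length + extra + len(word) > max_chars:
--             if not result:
--                 result.append(word[:max_chars])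
--
--             if not split_before_max:
--                 result.append(" ")
--                 result.append(word)
--             break
--
--         if extra:
--             result.append(" ")
--         result.append(word)
--         current_length += extra + len(word)
--
--     return "".join(result)
-- ===== SOURCE B (Python) =====
-- def truncate_filename(filename, max_chars, split_before_max=True):
--     """Prefix-sum re-implementation: compute cumulative joined lengths once,
--     locate the first word whose cumulative length exceeds max_chars, and build
--     the result by joining slices of the word list."""
--     words = filename.split()
--     cums = []
--     total = 0
--     for k, w in enumerate(words):
--         total += len(w) + (1 if k else 0)
--         cums.append(total)
--     cut = next((k for k, c in enumerate(cums) if c > max_chars), None)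
--     if cut is None:
--         return " ".join(words)
--     head = words[0][:max_chars] if cut == 0 else " ".join(words[:cut])
--     if split_before_max:
--         return head
--     return " ".join([head, words[cut]])
-- ===== Notes on version B (the rewrite author's own statement) =====
-- stated objective: alternative
-- what changed: A accumulates result pieces and a running length in one loop with an early break; B computes the cumulative joined lengths as a prefix-sum list, locates the first index exceeding max_chars, and builds the result by joining slices of the word list.
import Mathlib
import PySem

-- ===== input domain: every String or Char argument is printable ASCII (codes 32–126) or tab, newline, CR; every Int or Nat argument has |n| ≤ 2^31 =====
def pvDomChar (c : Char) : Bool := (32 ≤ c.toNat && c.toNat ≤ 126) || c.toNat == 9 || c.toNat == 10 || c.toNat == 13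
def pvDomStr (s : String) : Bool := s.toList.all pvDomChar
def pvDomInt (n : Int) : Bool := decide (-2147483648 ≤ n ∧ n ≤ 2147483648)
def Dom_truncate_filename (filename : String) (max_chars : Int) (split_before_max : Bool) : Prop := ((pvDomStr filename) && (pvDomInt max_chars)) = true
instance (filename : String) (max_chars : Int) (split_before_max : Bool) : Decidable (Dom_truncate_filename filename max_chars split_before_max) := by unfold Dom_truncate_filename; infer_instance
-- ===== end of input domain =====

-- B replaces A's accumulate-and-break loop by a prefix-sum scan: cumulative joined
-- lengths are computed once, the cut index is located, and the result is a join of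
-- list slices (objective: alternative decomposition, same asymptotic cost).


-- ===== PORT A =====
-- A's loop: accumulate pieces (words and separators) and a running length, break at
-- the first word that would overflow max_chars.
def pvALoop (max_chars : Int) (split_before_max : Bool) :
    List String → List String → Int → List String
  | [], result, _ => result
  | word :: words, result, current_length =>
    let extra : Int := if result.isEmpty then 0 else 1
    if current_length + extra + PySem.Str.len word > max_chars then
      let r1 := if result.isEmpty then result ++ [PySem.Str.slice word none (some max_chars)]
                else result
      if split_before_max then r1 else r1 ++ [" ", word]
    else
      pvALoop max_chars split_before_max words
        ((if result.isEmpty then result else result ++ [" "]) ++ [word])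
        (current_length + extra + PySem.Str.len word)

def truncate_filename (filename : String) (max_chars : Int) (split_before_max : Bool) : String :=
  PySem.Str.join "" (pvALoop max_chars split_before_max (PySem.Str.split₀ filename) [] 0)

-- ===== PORT B =====
-- cumulative joined lengths: entry k is len(" ".join(words[:k+1]))
def pvBCums : List String → Int → Bool → List Int
  | [], _, _ => []
  | w :: ws, total, first =>
    let total' := total + (if first then 0 else 1) + PySem.Str.len w
    total' :: pvBCums ws total' false

def truncate_filename_alt (filename : String) (max_chars : Int) (split_before_max : Bool) : String :=
  let words := PySem.Str.split₀ filename
  match (pvBCums words 0 true).findIdx? (fun c => decide (max_chars < c)) with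
  | none => PySem.Str.join " " words
  | some cut =>
    let head := if cut = 0 then PySem.Str.slice (words.headD "") none (some max_chars)
                else PySem.Str.join " " (words.take cut)
    if split_before_max then head else PySem.Str.join " " [head, words.getD cut ""]

-- ===== PRECONDITION & SPEC =====
def Spec_truncate_filename (filename : String) (max_chars : Int) (split_before_max : Bool) (out : String) : Prop := out = truncate_filename_alt filename max_chars split_before_max
instance (filename : String) (max_chars : Int) (split_before_max : Bool) (out : String) : Decidable (Spec_truncate_filename filename max_chars split_before_max out) := by unfold Spec_truncate_filename; infer_instance

-- ===== CLAIM (what is proved, stated in full; the proofs are below) =====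
def Claim_equal_truncate_filename : Prop := ∀ (filename : String) (max_chars : Int) (split_before_max : Bool), Dom_truncate_filename filename max_chars split_before_max → Spec_truncate_filename filename max_chars split_before_max (truncate_filename filename max_chars split_before_max)

-- ===== LEMMAS AND PROOFS =====

-- each word prefixed by a separator piece (the shape A's list of pieces takes)
def pvSep (l : List String) : List String := l.flatMap (fun u => [" ", u])

lemma pvEmptyToList : "".toList = ([] : List Char) := rfl
lemma pvSpaceToList : " ".toList = [' '] := rfl

-- empty-separator join is concatenation
lemma pvCflat (ls : List (List Char)) : PySem.Chars.join [] ls = ls.flatten := by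
  induction ls with
  | nil => simp [PySem.Chars.join_nil]
  | cons p ls ih =>
    cases ls with
    | nil => simp [PySem.Chars.join_singleton]
    | cons q rest => simp [PySem.Chars.join_cons_cons, ih]

lemma pvC1 (w : List Char) (ls : List (List Char)) :
    (w :: ls.flatMap (fun u => [[' '], u])).flatten = PySem.Chars.join [' '] (w :: ls) := by
  induction ls generalizing w with
  | nil => simp [PySem.Chars.join_singleton]
  | cons u ls ih =>
    simp only [List.flatMap_cons, List.cons_append, List.nil_append, List.flatten_cons,
      PySem.Chars.join_cons_cons]
    rw [← ih u]
    simp [List.flatten_cons, List.append_assoc]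

-- S1 : "".join(w :: sep-pieces of l) = " ".join(w :: l)
lemma pvS1 (w : String) (l : List String) :
    PySem.Str.join "" (w :: pvSep l) = PySem.Str.join " " (w :: l) := by
  refine String.toList_inj.mp ?_
  have hmap : List.map String.toList (pvSep l)
      = (l.map String.toList).flatMap (fun u => [[' '], u]) := by
    simp [pvSep, List.map_flatMap, List.flatMap_map, pvSpaceToList]
  simp only [PySem.Str.join, String.toList_ofList, List.map_cons, pvEmptyToList, pvSpaceToList,
    pvCflat, hmap]
  exact pvC1 w.toList (l.map String.toList)

-- S2 : "".join(xs ++ [" ", u]) = " ".join(["".join(xs), u])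
lemma pvS2 (xs : List String) (u : String) :
    PySem.Str.join "" (xs ++ [" ", u]) = PySem.Str.join " " [PySem.Str.join "" xs, u] := by
  refine String.toList_inj.mp ?_
  simp only [PySem.Str.join, String.toList_ofList, List.map_append, List.map_cons, List.map_nil,
    pvEmptyToList, pvSpaceToList, pvCflat, PySem.Chars.join_cons_cons, PySem.Chars.join_singleton]
  simp [List.flatten_append, List.flatten_cons]

lemma pvJoin_single (x : String) : PySem.Str.join "" [x] = x := by
  refine String.toList_inj.mp ?_
  simp [PySem.Str.join, PySem.Chars.join_singleton]

-- the steady state of A's loop (result already nonempty) against B's prefix sums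
lemma pvA_mid (mc : Int) (sb : Bool) :
    ∀ (ws : List String) (t : Int) (r : List String), r ≠ [] →
    pvALoop mc sb ws r t =
      match (pvBCums ws t false).findIdx? (fun c => decide (mc < c)) with
      | none => r ++ pvSep ws
      | some i =>
          if sb then r ++ pvSep (ws.take i)
          else (r ++ pvSep (ws.take i)) ++ [" ", ws.getD i ""] := by
  intro ws
  induction ws with
  | nil => intro t r hr; simp [pvALoop, pvBCums, pvSep]
  | cons w ws ih =>
    intro t r hr
    have hre : r.isEmpty = false := by simpa [List.isEmpty_iff] using hr
    rw [pvALoop, pvBCums]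
    simp only [hre, Bool.false_eq_true, if_false]
    rw [List.findIdx?_cons]
    by_cases hc : mc < t + 1 + PySem.Str.len w
    · rw [if_pos (decide_eq_true hc), if_pos (show t + 1 + PySem.Str.len w > mc from hc)]
      simp [pvSep]
    · rw [if_neg (by simpa using hc)]
      rw [if_neg (by simpa using hc)]
      rw [ih (t + 1 + PySem.Str.len w) (r ++ [" "] ++ [w]) (by simp)]
      cases h : (pvBCums ws (t + 1 + PySem.Str.len w) false).findIdx? (fun c => decide (mc < c)) with
      | none => simp [pvSep]
      | some i =>
        simp only [Option.map_some]
        rw [show (w :: ws).take (i + 1) = w :: ws.take i by simp,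
            show (w :: ws).getD (i + 1) "" = ws.getD i "" by simp [List.getD]]
        by_cases hsb : sb <;> simp [hsb, pvSep]

lemma pv_main (filename : String) (max_chars : Int) (split_before_max : Bool) :
    truncate_filename filename max_chars split_before_max
      = truncate_filename_alt filename max_chars split_before_max := by
  unfold truncate_filename truncate_filename_alt
  generalize PySem.Str.split₀ filename = ws
  cases ws with
  | nil => simp [pvALoop, pvBCums, PySem.Str.join, PySem.Chars.join_nil]
  | cons w ws =>
    simp only [pvALoop, pvBCums, List.isEmpty_nil, if_true]
    rw [List.findIdx?_cons]
    by_cases hc : max_chars < 0 + 0 + PySem.Str.len w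
    · rw [if_pos (show 0 + 0 + PySem.Str.len w > max_chars from hc),
          if_pos (decide_eq_true hc)]
      by_cases hsb : split_before_max
      · simp [hsb, pvJoin_single]
      · simp only [hsb, Bool.false_eq_true, if_false, List.nil_append, List.headD, List.getD]
        rw [pvS2, pvJoin_single]
        simp
    · rw [if_neg (show ¬ 0 + 0 + PySem.Str.len w > max_chars from hc),
          if_neg (by simpa using hc)]
      rw [show (([] ++ [w] : List String)) = [w] from rfl]
      rw [pvA_mid max_chars split_before_max ws (0 + 0 + PySem.Str.len w) [w] (by simp)]
      cases h : (pvBCums ws (0 + 0 + PySem.Str.len w) false).findIdx?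
          (fun c => decide (max_chars < c)) with
      | none =>
        simp only [Option.map_none]
        rw [show ([w] ++ pvSep ws : List String) = w :: pvSep ws from rfl, pvS1]
      | some i =>
        simp only [Option.map_some]
        rw [show (w :: ws).take (i + 1) = w :: ws.take i by simp,
            show (w :: ws).getD (i + 1) "" = ws.getD i "" by simp [List.getD]]
        by_cases hsb : split_before_max
        · simp only [hsb, if_true, if_neg (by simp : ¬ (i + 1 = 0))]
          rw [show ([w] ++ pvSep (ws.take i) : List String) = w :: pvSep (ws.take i) from rfl, pvS1]
        · simp only [hsb, Bool.false_eq_true, if_false, if_neg (by simp : ¬ (i + 1 = 0))]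
          rw [show (([w] ++ pvSep (ws.take i)) ++ [" ", ws.getD i ""] : List String)
                = (w :: pvSep (ws.take i)) ++ [" ", ws.getD i ""] from rfl,
            pvS2, pvS1]

-- ===== VERDICT (by name: the statement is the Claim_ definition above) =====
theorem truncate_filename_spec : Claim_equal_truncate_filename := by
  intro filename max_chars split_before_max _
  exact pv_main filename max_chars split_before_max
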